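-- pv_equiv track=rewrite | github.com/Tahuubinh/mdlm_llm_search | properties/trna.py | get_t_loop_score
-- ===== SOURCE A (Python) =====
-- def get_t_loop_score(sequence):
--     """
--     Calculate the score for the TΨC loop motif.
--     The canonical motif is 5'-TΨCGA-3' (GUUCGA in normalized RNA).
--     Input: Sequence (String)
--     Output: Highest score found (Int from 0 to 6)
--             - 6: Perfect Match (Valid)
--             - <6: Not valid
--     """
--
--     # Common TΨC loop motif variants
--     # In databases, Ψ (pseudouridine) and T (ribothymidine) are normalized to U
--     targets = [
--         "GUUCGA",  # Most standard: 5'-TΨCGA-3'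
--         "GUUCAA",  # Very common variant in mammals (A instead of G at position 5)
--         "GUUCGG",  # G at position 5 (purine variant)
--         "GUUCAG",  # Less common variant
--     ]
--
--     max_score = 0
--
--     for i in range(len(sequence) - 6 + 1):
--         window = sequence[i : i+6]
--
--         # Compare the current window with all target motifs
--         for target in targets:
--             score = sum(1 for a, b in zip(window, target) if a == b)
--             if score > max_score:
--                 max_score = score
--
--         # If a score of 6 (Perfect) is found, stop immediately for efficiency
--         if max_score == 6:
--             return 6
--
--     return max_score
-- ===== SOURCE B (Python) =====
-- # The four motifs are exactly "GUUC" x {G,A} x {A,G}, so the best motif score of a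
-- # window equals its score against the positional profile below; one pass, no inner
-- # loop over motifs.
-- PROFILE = ("G", "U", "U", "C", "GA", "AG")
--
--
-- def get_t_loop_score(sequence):
--     return max(
--         (sum(c in allowed for c, allowed in zip(sequence[i:i + 6], PROFILE))
--          for i in range(len(sequence) - 5)),
--         default=0,
--     )
-- ===== Notes on version B (the rewrite author's own statement) =====
-- stated objective: simpler
-- what changed: Replaces the inner loop over the four motif strings (and the early-exit branch) with a single positional-profile score per window: the four motifs share a common 4-base prefix and vary independently at the last two positions, so each window is scored once against a per-position allowed-character profile and the maximum is taken with max(..., default=0).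
import Mathlib
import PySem

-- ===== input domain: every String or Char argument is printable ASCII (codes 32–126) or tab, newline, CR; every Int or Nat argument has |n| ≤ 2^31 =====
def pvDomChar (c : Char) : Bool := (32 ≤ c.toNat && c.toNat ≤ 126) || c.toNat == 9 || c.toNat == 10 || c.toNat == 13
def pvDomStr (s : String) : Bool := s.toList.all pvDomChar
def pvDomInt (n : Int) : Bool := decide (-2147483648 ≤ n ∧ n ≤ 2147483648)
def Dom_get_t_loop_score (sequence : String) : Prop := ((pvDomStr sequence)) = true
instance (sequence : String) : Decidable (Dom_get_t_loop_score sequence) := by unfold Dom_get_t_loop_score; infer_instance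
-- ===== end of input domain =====

-- B replaces A's inner loop over the four motif strings by a single positional-profile
-- score per window (the motifs are exactly "GUUC" × {G,A} × {A,G}); objective: simpler.

-- ===== PORT A =====
-- score = sum(1 for a, b in zip(window, target) if a == b)
def pvZipScore (w t : List Char) : Int :=
  (w.zip t).foldl (fun s p => if p.1 = p.2 then s + 1 else s) 0

def pvTargets : List (List Char) :=
  [['G','U','U','C','G','A'], ['G','U','U','C','A','A'],
   ['G','U','U','C','G','G'], ['G','U','U','C','A','G']]

-- the outer for-loop with the early `return 6`
def pvALoop (seq : List Char) (idxs : List Int) (m : Int) : Int :=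
  match idxs with
  | [] => m
  | i :: rest =>
    let window := PySem.List.slice seq (some i) (some (i + 6))
    let m' := pvTargets.foldl
        (fun acc t => let score := pvZipScore window t
                      if score > acc then score else acc) m
    if m' = 6 then 6 else pvALoop seq rest m'

def get_t_loop_score (sequence : String) : Int :=
  let seq := sequence.toList
  pvALoop seq (PySem.List.pyRange 0 ((seq.length : Int) - 6 + 1) 1) 0

-- ===== PORT B =====
-- PROFILE = ("G", "U", "U", "C", "GA", "AG")
def pvProfile : List (List Char) :=
  [['G'], ['U'], ['U'], ['C'], ['G','A'], ['A','G']]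

-- sum(c in allowed for c, allowed in zip(window, PROFILE))
def pvProfileScore (w : List Char) : Int :=
  (w.zip pvProfile).foldl (fun s p => if p.2.contains p.1 then s + 1 else s) 0

def get_t_loop_score_alt (sequence : String) : Int :=
  let seq := sequence.toList
  (PySem.List.max?
      ((PySem.List.pyRange 0 ((seq.length : Int) - 5) 1).map
        (fun i => pvProfileScore (PySem.List.slice seq (some i) (some (i + 6)))))
      (fun x => x)).getD 0

-- ===== PRECONDITION & SPEC =====
def Spec_get_t_loop_score (sequence : String) (out : Int) : Prop := out = get_t_loop_score_alt sequence
instance (sequence : String) (out : Int) : Decidable (Spec_get_t_loop_score sequence out) := by unfold Spec_get_t_loop_score; infer_instance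

-- ===== CLAIM (what is proved, stated in full; the proofs are below) =====
def Claim_equal_get_t_loop_score : Prop := ∀ (sequence : String), Dom_get_t_loop_score sequence → Spec_get_t_loop_score sequence (get_t_loop_score sequence)

-- ===== LEMMAS AND PROOFS =====

theorem pv_ite_add (p : Prop) [Decidable p] (s : Int) :
    (if p then s + 1 else s) = s + (if p then (1:Int) else 0) := by
  split_ifs <;> omega

-- profile score is between 0 and 6, for any window
theorem pvProfileScore_bounds (w : List Char) :
    0 ≤ pvProfileScore w ∧ pvProfileScore w ≤ 6 := by
  have key : ∀ (l : List (Char × List Char)) (c : Int),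
      c ≤ l.foldl (fun s p => if p.2.contains p.1 then s + 1 else s) c ∧
      l.foldl (fun s p => if p.2.contains p.1 then s + 1 else s) c ≤ c + l.length := by
    intro l
    induction l with
    | nil => intro c; simp
    | cons h t ih =>
      intro c
      have := ih (if h.2.contains h.1 then c + 1 else c)
      simp only [List.foldl_cons, List.length_cons]
      constructor
      · refine le_trans ?_ this.1; split_ifs <;> omega
      · refine le_trans this.2 ?_; split_ifs <;> (try ring_nf) <;> omega
  have hlen : ((w.zip pvProfile).length : Int) ≤ 6 := by
    simp [List.length_zip, pvProfile]
  have := key (w.zip pvProfile) 0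
  unfold pvProfileScore
  omega

-- the inner loop over the 4 motifs computes max m (profile score), for ANY window
set_option maxHeartbeats 1000000 in
theorem pv_window (w : List Char) (m : Int) :
    pvTargets.foldl
      (fun acc t => let score := pvZipScore w t
                    if score > acc then score else acc) m
      = max m (pvProfileScore w) := by
  rw [show (fun (acc : Int) (t : List Char) => let score := pvZipScore w t
            if score > acc then score else acc)
        = fun (acc : Int) (t : List Char) =>
            if pvZipScore w t > acc then pvZipScore w t else acc from rfl]
  match w with
  | [] =>
    simp only [pvTargets, pvZipScore, pvProfileScore, pvProfile, List.zip, List.zipWith,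
      List.foldl]
    split_ifs <;> (try ring_nf) <;> omega
  | [a] =>
    simp only [pvTargets, pvZipScore, pvProfileScore, pvProfile, List.zip, List.zipWith,
      List.foldl, List.zipWith_nil_right, List.contains_cons, List.contains_nil, beq_iff_eq,
      Bool.or_eq_true, Bool.or_false, pv_ite_add, zero_add]
    generalize (if a = 'G' then (1:Int) else 0) = xa
    split_ifs <;> (try ring_nf) <;> omega
  | [a,b] =>
    simp only [pvTargets, pvZipScore, pvProfileScore, pvProfile, List.zip, List.zipWith,
      List.foldl, List.zipWith_nil_right, List.contains_cons, List.contains_nil, beq_iff_eq,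
      Bool.or_eq_true, Bool.or_false, pv_ite_add, zero_add]
    generalize (if a = 'G' then (1:Int) else 0) = xa
    generalize (if b = 'U' then (1:Int) else 0) = xb
    split_ifs <;> (try ring_nf) <;> omega
  | [a,b,c] =>
    simp only [pvTargets, pvZipScore, pvProfileScore, pvProfile, List.zip, List.zipWith,
      List.foldl, List.zipWith_nil_right, List.contains_cons, List.contains_nil, beq_iff_eq,
      Bool.or_eq_true, Bool.or_false, pv_ite_add, zero_add]
    generalize (if a = 'G' then (1:Int) else 0) = xa
    generalize (if b = 'U' then (1:Int) else 0) = xb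
    generalize (if c = 'U' then (1:Int) else 0) = xc
    split_ifs <;> (try ring_nf) <;> omega
  | [a,b,c,d] =>
    simp only [pvTargets, pvZipScore, pvProfileScore, pvProfile, List.zip, List.zipWith,
      List.foldl, List.zipWith_nil_right, List.contains_cons, List.contains_nil, beq_iff_eq,
      Bool.or_eq_true, Bool.or_false, pv_ite_add, zero_add]
    generalize (if a = 'G' then (1:Int) else 0) = xa
    generalize (if b = 'U' then (1:Int) else 0) = xb
    generalize (if c = 'U' then (1:Int) else 0) = xc
    generalize (if d = 'C' then (1:Int) else 0) = xd
    split_ifs <;> (try ring_nf) <;> omega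
  | [a,b,c,d,e] =>
    simp only [pvTargets, pvZipScore, pvProfileScore, pvProfile, List.zip, List.zipWith,
      List.foldl, List.zipWith_nil_right, List.contains_cons, List.contains_nil, beq_iff_eq,
      Bool.or_eq_true, Bool.or_false, pv_ite_add, zero_add]
    generalize (if a = 'G' then (1:Int) else 0) = xa
    generalize (if b = 'U' then (1:Int) else 0) = xb
    generalize (if c = 'U' then (1:Int) else 0) = xc
    generalize (if d = 'C' then (1:Int) else 0) = xd
    by_cases h5 : e = 'G' <;> by_cases h6 : e = 'A' <;> simp_all <;> (try split_ifs) <;> (try ring_nf) <;> omega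
  | a :: b :: c :: d :: e :: f :: rest =>
    simp only [pvTargets, pvZipScore, pvProfileScore, pvProfile, List.zip, List.zipWith,
      List.foldl, List.zipWith_nil_right, List.contains_cons, List.contains_nil, beq_iff_eq,
      Bool.or_eq_true, Bool.or_false, pv_ite_add, zero_add]
    generalize (if a = 'G' then (1:Int) else 0) = xa
    generalize (if b = 'U' then (1:Int) else 0) = xb
    generalize (if c = 'U' then (1:Int) else 0) = xc
    generalize (if d = 'C' then (1:Int) else 0) = xd
    by_cases h5 : e = 'G' <;> by_cases h6 : e = 'A' <;>
      by_cases h7 : f = 'A' <;> by_cases h8 : f = 'G' <;> simp_all <;> (try split_ifs) <;> (try ring_nf) <;> omega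

theorem pv_foldl_max_of_le {l : List Int} {a : Int} (h : ∀ x ∈ l, x ≤ a) :
    l.foldl max a = a := by
  induction l with
  | nil => rfl
  | cons x t ih =>
    simp only [List.foldl_cons]
    have hx : x ≤ a := h x (List.mem_cons_self ..)
    rw [max_eq_left hx]
    exact ih (fun y hy => h y (List.mem_cons_of_mem _ hy))

-- A's early-exit loop equals the running max of the profile scores
theorem pvALoop_eq (seq : List Char) (idxs : List Int) (m : Int) (hm : m ≤ 6) :
    pvALoop seq idxs m =
      (idxs.map (fun i => pvProfileScore (PySem.List.slice seq (some i) (some (i + 6))))).foldl max m := by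
  induction idxs generalizing m with
  | nil => rfl
  | cons i rest ih =>
    rw [pvALoop]
    simp only [pv_window, List.map_cons, List.foldl_cons]
    set s := pvProfileScore (PySem.List.slice seq (some i) (some (i + 6))) with hs
    by_cases h6 : max m s = 6
    · rw [if_pos h6]
      have hall : ∀ x ∈ (rest.map (fun i => pvProfileScore (PySem.List.slice seq (some i) (some (i + 6))))),
          x ≤ max m s := by
        intro x hx
        obtain ⟨j, _, rfl⟩ := List.mem_map.mp hx
        have := (pvProfileScore_bounds (PySem.List.slice seq (some j) (some (j + 6)))).2
        omega
      rw [pv_foldl_max_of_le hall, h6]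
    · rw [if_neg h6]
      exact ih (max m s) (by
        have := (pvProfileScore_bounds (PySem.List.slice seq (some i) (some (i + 6)))).2
        rw [← hs] at this; omega)

-- ===== VERDICT (by name: the statement is the Claim_ definition above) =====
theorem get_t_loop_score_spec : Claim_equal_get_t_loop_score := by
  intro sequence _
  show pvALoop sequence.toList
      (PySem.List.pyRange 0 ((sequence.toList.length : Int) - 6 + 1) 1) 0
    = (PySem.List.max?
        ((PySem.List.pyRange 0 ((sequence.toList.length : Int) - 5) 1).map
          (fun i => pvProfileScore (PySem.List.slice sequence.toList (some i) (some (i + 6)))))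
        (fun x => x)).getD 0
  have hr : ((sequence.toList.length : Int) - 6 + 1) = ((sequence.toList.length : Int) - 5) := by
    omega
  rw [hr, pvALoop_eq sequence.toList _ 0 (by omega)]
  generalize hG : (PySem.List.pyRange 0 ((sequence.toList.length : Int) - 5) 1).map
      (fun i => pvProfileScore (PySem.List.slice sequence.toList (some i) (some (i + 6)))) = S
  cases S with
  | nil => simp [PySem.List.max?]
  | cons x t =>
    rw [PySem.List.max?_id_cons]
    simp only [List.foldl_cons, Option.getD_some]
    have hx : 0 ≤ x := by
      have hmem : x ∈ x :: t := List.mem_cons_self ..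
      rw [← hG] at hmem
      obtain ⟨j, _, rfl⟩ := List.mem_map.mp hmem
      exact (pvProfileScore_bounds _).1
    rw [max_eq_right hx]
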